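-- pv_equiv track=rewrite | github.com/AMD-AGI/TraceLens | TraceLens/AgenticMode/SemanticComparison/trace_breakdown/augment_trace.py | build_layer_spans
-- ===== SOURCE A (Python) =====
-- def _clamp_spans(spans):
--     """Ensure no overlaps: clamp each span's end to not exceed the next span's start.
--
--     GPU kernel timestamps can have sub-microsecond overlaps between consecutive
--     kernels, which causes annotation spans to overlap. Perfetto hides or stacks
--     overlapping events on the same track, making some appear missing.
--
--     Works with tuples of any length where the last two elements are (ts, te).
--     """
--     for i in range(len(spans) - 1):
--         *prefix, ts, te = spans[i]
--         next_ts = spans[i + 1][-2]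
--         if te > next_ts:
--             spans[i] = (*prefix, ts, next_ts)
--     return spans
--
-- def build_layer_spans(groups):
--     """Merge consecutive groups into layer-level spans."""
--     spans = []
--     current_label = None
--     span_start = None
--     span_end = None
--
--     for block, layer, ts, te in groups:
--         if layer is None:
--             label = block.split(":")[0] if ":" in block else block
--         else:
--             label = f"Layer {layer}"
--
--         if label != current_label:
--             if current_label is not None:
--                 spans.append((current_label, span_start, span_end))
--             current_label = label
--             span_start = ts
--             span_end = te
--         else:
--             span_end = max(span_end, te)
--
--     if current_label is not None:
--         spans.append((current_label, span_start, span_end))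
--
--     return _clamp_spans(spans)
-- ===== SOURCE B (Python) =====
-- def build_layer_spans(groups):
--     """Divide-and-conquer: label each group, recursively build the halves' spans and
--     join them at the seam (merging consecutive runs is associative), then clamp each
--     span's end against its successor's start with a zip."""
--     def _label(block, layer):
--         if layer is None:
--             return block.split(":")[0] if ":" in block else block
--         return f"Layer {layer}"
--
--     def _merge(items):
--         if len(items) <= 1:
--             return list(items)
--         mid = len(items) // 2
--         left, right = _merge(items[:mid]), _merge(items[mid:])
--         (l1, s1, e1), (l2, _s2, e2) = left[-1], right[0]
--         if l1 == l2:
--             return left[:-1] + [(l1, s1, max(e1, e2))] + right[1:]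
--         return left + right
--
--     spans = _merge([(_label(b, l), ts, te) for b, l, ts, te in groups])
--     return [(lab, ts, min(te, nxt[1])) for (lab, ts, te), nxt in zip(spans, spans[1:])] + spans[-1:]
-- ===== Notes on version B (the rewrite author's own statement) =====
-- stated objective: alternative
-- what changed: Replaces A's forward state machine (current_label/span_start/span_end accumulators threaded through one loop, then an index-mutating clamp pass) with a divide-and-conquer construction: label each group, recursively compute each half's merged spans and join them at the seam (run-merging is associative), then clamp ends by zipping each span with its successor.
import Mathlib
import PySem

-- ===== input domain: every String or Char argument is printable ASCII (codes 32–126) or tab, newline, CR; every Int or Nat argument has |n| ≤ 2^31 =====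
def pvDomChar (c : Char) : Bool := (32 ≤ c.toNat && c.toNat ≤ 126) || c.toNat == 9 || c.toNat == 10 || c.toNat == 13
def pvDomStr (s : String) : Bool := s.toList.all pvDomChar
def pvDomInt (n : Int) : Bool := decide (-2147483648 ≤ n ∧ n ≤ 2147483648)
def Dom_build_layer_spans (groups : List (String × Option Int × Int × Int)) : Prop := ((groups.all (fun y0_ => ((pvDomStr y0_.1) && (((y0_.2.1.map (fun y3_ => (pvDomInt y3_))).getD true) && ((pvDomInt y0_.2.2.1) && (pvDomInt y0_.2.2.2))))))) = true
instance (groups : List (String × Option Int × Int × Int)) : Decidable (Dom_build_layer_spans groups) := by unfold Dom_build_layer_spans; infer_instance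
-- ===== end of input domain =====

-- B replaces A's forward accumulator state machine (current_label/span_start/span_end threaded
-- through the loop, then an index-mutating clamp pass) with a divide-and-conquer build: label each
-- group, recursively merge each half's spans joining at the seam, and clamp by zipping each span
-- with its successor; same value proved (A mutates only its local spans list, no argument).

-- ===== PORT A =====
-- the loop of A: state (spans, current_label, span_start, span_end); span_start/span_end start as
-- Python None but are only ever read after being set, so they are carried as Int initialised to 0
def aLoop : List (String × Option Int × Int × Int) → List (String × Int × Int) → Option String → Int → Int → List (String × Int × Int) × Option String × Int × Int
  | [], spans, cur, ss, se => (spans, cur, ss, se)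
  | (block, layer, ts, te) :: rest, spans, cur, ss, se =>
    let label := match layer with
      | none => if PySem.Str.isIn ":" block then ((PySem.Str.split? block ":").getD []).headD block else block
        -- split(":")[0]: split? with the non-empty separator ":" is some and never empty, so [0] is its head
      | some l => "Layer " ++ PySem.Int.toStr l
    if some label ≠ cur then
      aLoop rest (match cur with | some c => spans ++ [(c, ss, se)] | none => spans) (some label) ts te
    else
      aLoop rest spans cur ss (max se te)

-- _clamp_spans: spans[i]'s end is clamped against the (not yet rewritten) spans[i+1][-2]
def clampSpans : List (String × Int × Int) → List (String × Int × Int)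
  | [] => []
  | [x] => [x]
  | (lab, ts, te) :: y :: rest =>
    (lab, ts, if te > y.2.1 then y.2.1 else te) :: clampSpans (y :: rest)

def build_layer_spans (groups : List (String × Option Int × Int × Int)) : List (String × Int × Int) :=
  match aLoop groups [] none 0 0 with
  | (spans, some c, ss, se) => clampSpans (spans ++ [(c, ss, se)])
  | (spans, none, _, _) => clampSpans spans

-- ===== PORT B =====
def pvLabel (block : String) (layer : Option Int) : String :=
  match layer with
  | none => if PySem.Str.isIn ":" block then ((PySem.Str.split? block ":").getD []).headD block else block
  | some l => "Layer " ++ PySem.Int.toStr l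

-- _merge: divide-and-conquer; on lists of length ≥ 2 both halves are non-empty and their merged
-- spans non-empty, so Python's left[-1]/right[0] never fail; the wildcard row is unreachable there
def bMerge (items : List (String × Int × Int)) : List (String × Int × Int) :=
  if h : items.length ≤ 1 then items
  else
    let mid := items.length / 2
    let left := bMerge (items.take mid)
    let right := bMerge (items.drop mid)
    match left.getLast?, right with
    | some (l1, s1, e1), (l2, _s2, e2) :: r =>
      if l1 == l2 then left.dropLast ++ [(l1, s1, max e1 e2)] ++ r
      else left ++ right
    | _, _ => left ++ right
  termination_by items.length
  decreasing_by
  · simp only [List.length_take]; omega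
  · simp only [List.length_drop]; omega

def build_layer_spans_alt (groups : List (String × Option Int × Int × Int)) : List (String × Int × Int) :=
  let spans := bMerge (groups.map (fun g => (pvLabel g.1 g.2.1, g.2.2.1, g.2.2.2)))
  ((spans.zip (spans.drop 1)).map (fun p => (p.1.1, p.1.2.1, min p.1.2.2 p.2.2.1)))
    ++ (match spans.getLast? with | some x => [x] | none => [])   -- spans[-1:]

-- ===== PRECONDITION & SPEC =====
def Spec_build_layer_spans (groups : List (String × Option Int × Int × Int)) (out : List (String × Int × Int)) : Prop := out = build_layer_spans_alt groups
instance (groups : List (String × Option Int × Int × Int)) (out : List (String × Int × Int)) : Decidable (Spec_build_layer_spans groups out) := by unfold Spec_build_layer_spans; infer_instance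

-- ===== CLAIM (what is proved, stated in full; the proofs are below) =====
def Claim_equal_build_layer_spans : Prop := ∀ (groups : List (String × Option Int × Int × Int)), Dom_build_layer_spans groups → Spec_build_layer_spans groups (build_layer_spans groups)

-- ===== LEMMAS AND PROOFS =====

-- proof-only intermediate: forward run grouping (label, first ts, max te over the run)
def bRuns : List (String × Int × Int) → List (String × Int × Int)
  | [] => []
  | (lab, ts, te) :: rest =>
    (lab, ts, ((rest.takeWhile (fun t => t.1 == lab)).map (fun t => t.2.2)).foldl max te)
      :: bRuns (rest.dropWhile (fun t => t.1 == lab))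
  termination_by l => l.length
  decreasing_by simpa using Nat.lt_succ_of_le (List.length_dropWhile_le _ _)

-- finish of A's loop: run it, then append the still-open span (the code after the for loop)
def finishA (g : List (String × Option Int × Int × Int)) (sp : List (String × Int × Int)) (cur : Option String) (ss se : Int) : List (String × Int × Int) :=
  match aLoop g sp cur ss se with
  | (spans, some c, a, b) => spans ++ [(c, a, b)]
  | (spans, none, _, _) => spans

theorem finishA_some (g : List (String × Option Int × Int × Int)) (sp : List (String × Int × Int)) (c : String) (ss se : Int) :
    finishA g sp (some c) ss se = sp ++ bRuns ((c, ss, se) :: g.map (fun x => (pvLabel x.1 x.2.1, x.2.2.1, x.2.2.2))) := by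
  induction g generalizing sp c ss se with
  | nil => simp [finishA, aLoop, bRuns]
  | cons h rest ih =>
    obtain ⟨block, layer, ts, te⟩ := h
    simp only [finishA, aLoop, List.map_cons]
    rw [show (match layer with
      | none => if PySem.Str.isIn ":" block then ((PySem.Str.split? block ":").getD []).headD block else block
      | some l => "Layer " ++ PySem.Int.toStr l) = pvLabel block layer from rfl]
    by_cases hl : pvLabel block layer = c
    · rw [if_neg (by simp [hl])]
      have := ih sp c ss (max se te)
      simp only [finishA] at this
      rw [this, bRuns, bRuns]
      simp [hl, List.takeWhile, List.dropWhile]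
    · rw [if_pos (by simp [hl])]
      have := ih (sp ++ [(c, ss, se)]) (pvLabel block layer) ts te
      simp only [finishA] at this
      rw [this]
      conv_rhs => rw [bRuns]
      have hb : (pvLabel block layer == c) = false := by simp [hl]
      simp [List.takeWhile, List.dropWhile, hb, bRuns]

theorem finishA_none (g : List (String × Option Int × Int × Int)) :
    finishA g [] none 0 0 = bRuns (g.map (fun x => (pvLabel x.1 x.2.1, x.2.2.1, x.2.2.2))) := by
  cases g with
  | nil => simp [finishA, aLoop, bRuns]
  | cons h rest =>
    obtain ⟨block, layer, ts, te⟩ := h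
    simp only [finishA, aLoop]
    rw [show (match layer with
      | none => if PySem.Str.isIn ":" block then ((PySem.Str.split? block ":").getD []).headD block else block
      | some l => "Layer " ++ PySem.Int.toStr l) = pvLabel block layer from rfl]
    rw [if_pos (by simp)]
    have := finishA_some rest [] (pvLabel block layer) ts te
    simp only [finishA] at this
    rw [this]
    simp

-- proof-only: merge one element into the front of already-grouped spans (foldr view of grouping)
def push (x : String × Int × Int) : List (String × Int × Int) → List (String × Int × Int)
  | [] => [x]
  | (l2, s2, e2) :: r => if x.1 == l2 then (x.1, x.2.1, max x.2.2 e2) :: r else x :: (l2, s2, e2) :: r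

def runsR : List (String × Int × Int) → List (String × Int × Int)
  | [] => []
  | x :: t => push x (runsR t)

-- the seam join of bMerge, named for the proofs
def comb (L R : List (String × Int × Int)) : List (String × Int × Int) :=
  match L.getLast?, R with
  | some (l1, s1, e1), (l2, _s2, e2) :: r =>
    if l1 == l2 then L.dropLast ++ [(l1, s1, max e1 e2)] ++ r
    else L ++ R
  | _, _ => L ++ R

theorem foldl_max_comm (a : Int) (l : List Int) (b : Int) :
    max a (l.foldl max b) = l.foldl max (max a b) := by
  induction l generalizing b with
  | nil => rfl
  | cons c t ih => simp only [List.foldl]; rw [ih, max_assoc]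

theorem push_bRuns (x : String × Int × Int) (l : List (String × Int × Int)) :
    push x (bRuns l) = bRuns (x :: l) := by
  obtain ⟨lab, ts, te⟩ := x
  cases l with
  | nil => simp [bRuns, push]
  | cons y r =>
    obtain ⟨l2, s2, e2⟩ := y
    by_cases h : lab = l2
    · subst h
      rw [bRuns, bRuns, push]
      simp only [beq_self_eq_true, if_pos, List.takeWhile, List.dropWhile]
      simp [List.map_cons, foldl_max_comm]
    · have hb : (lab == l2) = false := by simp [h]
      have hb2 : ((l2 : String) == lab) = false := by simp [Ne.symm h]
      rw [bRuns, push]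
      conv_rhs => rw [bRuns]
      simp [List.takeWhile, List.dropWhile, hb, hb2, bRuns]

theorem runsR_eq_bRuns (l : List (String × Int × Int)) : runsR l = bRuns l := by
  induction l with
  | nil => simp [runsR, bRuns]
  | cons x t ih => rw [runsR, ih, push_bRuns]

theorem comb_nil_left (R : List (String × Int × Int)) : comb [] R = R := by
  cases R with
  | nil => rfl
  | cons y r => obtain ⟨a, b, c⟩ := y; simp [comb]

theorem comb_cons (z : String × Int × Int) (L R : List (String × Int × Int)) (hL : L ≠ []) :
    comb (z :: L) R = z :: comb L R := by
  cases R with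
  | nil =>
    obtain ⟨a, b, c⟩ := z
    cases hl : L.getLast? with
    | none => exact absurd (List.getLast?_eq_none_iff.mp hl) hL
    | some w => obtain ⟨p, q, s⟩ := w; simp [comb]
  | cons y r =>
    obtain ⟨l2, s2, e2⟩ := y
    cases hl : L.getLast? with
    | none => exact absurd (List.getLast?_eq_none_iff.mp hl) hL
    | some w =>
      obtain ⟨l1, s1, e1⟩ := w
      have hzl : (z :: L).getLast? = some (l1, s1, e1) := by
        cases L with
        | nil => exact absurd rfl hL
        | cons a t => rw [List.getLast?_cons_cons]; exact hl
      have hdl : (z :: L).dropLast = z :: L.dropLast := by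
        cases L with | nil => exact absurd rfl hL | cons _ _ => rfl
      simp only [comb, hzl, hl, hdl]
      by_cases h : l1 = l2 <;> simp [h]

theorem comb_single (x : String × Int × Int) (R : List (String × Int × Int)) :
    comb [x] R = push x R := by
  obtain ⟨l1, s1, e1⟩ := x
  cases R with
  | nil => simp [comb, push]
  | cons y r =>
    obtain ⟨l2, s2, e2⟩ := y
    by_cases h : l1 = l2 <;> simp [comb, push, h]

theorem push_shape (y : String × Int × Int) (R : List (String × Int × Int)) :
    ∃ s e R', push y R = (y.1, s, e) :: R' := by
  cases R with
  | nil => exact ⟨y.2.1, y.2.2, [], by simp [push]⟩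
  | cons z r =>
    obtain ⟨l2, s2, e2⟩ := z
    by_cases h : y.1 = l2
    · exact ⟨y.2.1, max y.2.2 e2, r, by simp [push, h]⟩
    · exact ⟨y.2.1, y.2.2, (l2, s2, e2) :: r, by simp [push, h]⟩

theorem push_ne (x : String × Int × Int) (l : String) (sv ev : Int)
    (R : List (String × Int × Int)) (h : x.1 ≠ l) :
    push x ((l, sv, ev) :: R) = x :: (l, sv, ev) :: R := by
  simp [push, h]

theorem push_push_same (x y : String × Int × Int) (R : List (String × Int × Int))
    (h : x.1 = y.1) : push x (push y R) = push (x.1, x.2.1, max x.2.2 y.2.2) R := by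
  cases R with
  | nil => simp [push, h]
  | cons z r =>
    obtain ⟨l2, s2, e2⟩ := z
    by_cases h2 : y.1 = l2
    · simp [push, h, h2, max_assoc]
    · simp [push, h, h2]

theorem push_comb (x : String × Int × Int) (L R : List (String × Int × Int)) :
    push x (comb L R) = comb (push x L) R := by
  cases L with
  | nil => rw [comb_nil_left, show push x [] = [x] from rfl, comb_single]
  | cons y L' =>
    by_cases h : x.1 = y.1
    · -- x merges into L's head
      cases L' with
      | nil =>
        rw [comb_single, push_push_same x y R h,
          show push x [y] = [(x.1, x.2.1, max x.2.2 y.2.2)] from by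
            obtain ⟨a, b, c⟩ := y; simp [push, h],
          comb_single]
      | cons z L'' =>
        obtain ⟨ly, sy, ey⟩ := y
        have h' : x.1 = ly := h
        rw [comb_cons (ly, sy, ey) (z :: L'') R (by simp),
          show push x ((ly, sy, ey) :: comb (z :: L'') R)
              = (x.1, x.2.1, max x.2.2 ey) :: comb (z :: L'') R from by simp [push, h'],
          show push x ((ly, sy, ey) :: z :: L'')
              = (x.1, x.2.1, max x.2.2 ey) :: z :: L'' from by simp [push, h'],
          comb_cons (x.1, x.2.1, max x.2.2 ey) (z :: L'') R (by simp)]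
    · -- labels differ: x is prepended on both sides
      obtain ⟨ly, sy, ey⟩ := y
      have h' : x.1 ≠ ly := h
      cases L' with
      | nil =>
        rw [comb_single]
        obtain ⟨s, e, R', hps⟩ := push_shape (ly, sy, ey) R
        rw [hps, push_ne _ _ _ _ _ h', push_ne _ _ _ _ _ h',
          comb_cons _ _ _ (by simp), comb_single, hps]
      | cons z L'' =>
        rw [comb_cons (ly, sy, ey) (z :: L'') R (by simp), push_ne _ _ _ _ _ h', push_ne _ _ _ _ _ h',
          comb_cons x ((ly, sy, ey) :: z :: L'') R (by simp),
          comb_cons (ly, sy, ey) (z :: L'') R (by simp)]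

theorem runsR_append (xs ys : List (String × Int × Int)) :
    runsR (xs ++ ys) = comb (runsR xs) (runsR ys) := by
  induction xs with
  | nil => simp [runsR, comb_nil_left]
  | cons x t ih => simp only [List.cons_append, runsR, ih, push_comb]

theorem bMerge_eq_runsR (l : List (String × Int × Int)) : bMerge l = runsR l := by
  induction hn : l.length using Nat.strong_induction_on generalizing l with
  | _ n ih =>
    by_cases h : l.length ≤ 1
    · rw [bMerge, dif_pos h]
      match l, h with
      | [], _ => rfl
      | [x], _ => simp [runsR, push]
    · rw [bMerge, dif_neg h]
      have h2 : 2 ≤ l.length := by omega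
      have hmid : 1 ≤ l.length / 2 ∧ l.length / 2 < l.length := by omega
      have htake : (l.take (l.length / 2)).length < n := by
        subst hn; simpa [Nat.min_eq_left (le_of_lt hmid.2)] using hmid.2
      have hdrop : (l.drop (l.length / 2)).length < n := by
        subst hn; simp; omega
      have e1 := ih _ htake _ rfl
      have e2 := ih _ hdrop _ rfl
      show comb (bMerge (l.take (l.length / 2))) (bMerge (l.drop (l.length / 2))) = runsR l
      rw [e1, e2, ← runsR_append, List.take_append_drop]

theorem clamp_eq (s : List (String × Int × Int)) :
    clampSpans s = ((s.zip (s.drop 1)).map (fun p => (p.1.1, p.1.2.1, min p.1.2.2 p.2.2.1)))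
      ++ (match s.getLast? with | some x => [x] | none => []) := by
  induction s with
  | nil => simp [clampSpans]
  | cons x t ih =>
    cases t with
    | nil => simp [clampSpans]
    | cons y r =>
      obtain ⟨lab, ts, te⟩ := x
      rw [clampSpans, ih]
      have hmin : (if te > y.2.1 then y.2.1 else te) = min te y.2.1 := by
        by_cases h : te > y.2.1
        · rw [if_pos h, min_eq_right (le_of_lt h)]
        · rw [if_neg h, min_eq_left (by omega)]
      rw [hmin]
      simp [List.getLast?_cons_cons]

-- ===== VERDICT (by name: the statement is the Claim_ definition above) =====
theorem build_layer_spans_spec : Claim_equal_build_layer_spans := by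
  intro groups _
  unfold Spec_build_layer_spans
  have hA : build_layer_spans groups = clampSpans (finishA groups [] none 0 0) := by
    unfold build_layer_spans finishA
    rcases aLoop groups [] none 0 0 with ⟨sp, cur, a, b⟩
    cases cur <;> rfl
  rw [hA, finishA_none, clamp_eq, ← runsR_eq_bRuns, ← bMerge_eq_runsR]
  rfl
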